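-- pv_equiv track=rewrite | github.com/timmy-feng/lang-autoencoder | preprocess.py | line_to_sentence
-- ===== SOURCE A (Python) =====
-- def line_to_sentence(line):
--     num_quotes = 0
--     for i, char in enumerate(line):
--         if num_quotes == 5:
--             line = line[i:]
--             break
--         if char == '"':
--             num_quotes += 1
--
--     return line[:-1]
-- ===== SOURCE B (Python) =====
-- def line_to_sentence(line):
--     # Delegate the quote scan to str.split with maxsplit=5; when there is a
--     # character after the 5th quote, keep (and trim) only the tail segment.
--     parts = line.split('"', 5)
--     if len(parts) == 6 and parts[5]:
--         return parts[5][:-1]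
--     return line[:-1]
-- ===== Notes on version B (the rewrite author's own statement) =====
-- stated objective: idiomatic
-- what changed: Replaces the manual enumerate-and-count loop with break and slicing by a single str.split with maxsplit 5, returning the trimmed tail segment when a character follows the 5th quote and the trimmed whole line otherwise.
import Mathlib
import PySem

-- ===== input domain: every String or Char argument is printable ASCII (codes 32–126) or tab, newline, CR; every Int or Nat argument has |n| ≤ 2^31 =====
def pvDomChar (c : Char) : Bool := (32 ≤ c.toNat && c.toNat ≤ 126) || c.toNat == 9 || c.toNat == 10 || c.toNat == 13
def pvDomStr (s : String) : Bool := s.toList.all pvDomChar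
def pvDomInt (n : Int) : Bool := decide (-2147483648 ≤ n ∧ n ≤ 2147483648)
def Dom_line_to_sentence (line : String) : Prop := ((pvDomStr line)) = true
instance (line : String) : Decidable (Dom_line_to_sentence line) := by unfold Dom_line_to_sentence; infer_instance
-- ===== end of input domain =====

-- B trims the tail after the 5th quote via one split('"', 5) instead of A's manual
-- enumerate-and-count loop with a break (objective: idiomatic; same behaviour everywhere).

-- ===== PORT A =====
-- A's loop: enumerate the characters, counting quotes; once the count reaches 5
-- at some index i, replace line by line[i:] and break; finally return line[:-1].
def pvALoop (full : List Char) : List Char → Nat → Nat → List Char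
  | [], _, _ => full
  | c :: rest, i, cnt =>
    if cnt == 5 then full.drop i
    else pvALoop full rest (i + 1) (if c == '"' then cnt + 1 else cnt)

def line_to_sentence (line : String) : String :=
  String.mk ((pvALoop line.toList line.toList 0 0).dropLast)

-- ===== PORT B =====
-- Source B's line.split('"', 5): split at the first quote at most n times.
def pvSplitQ : Nat → List Char → List (List Char)
  | 0, cs => [cs]
  | n + 1, cs =>
    match cs.dropWhile (· ≠ '"') with
    | [] => [cs]
    | _ :: tail => cs.takeWhile (· ≠ '"') :: pvSplitQ n tail

def line_to_sentence_alt (line : String) : String :=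
  let parts := pvSplitQ 5 line.toList
  if parts.length == 6 && !(parts.getD 5 []).isEmpty then
    String.mk (parts.getD 5 []).dropLast
  else
    String.mk line.toList.dropLast

-- ===== PRECONDITION & SPEC =====
def Spec_line_to_sentence (line : String) (out : String) : Prop := out = line_to_sentence_alt line
instance (line : String) (out : String) : Decidable (Spec_line_to_sentence line out) := by unfold Spec_line_to_sentence; infer_instance

-- ===== CLAIM (what is proved, stated in full; the proofs are below) =====
def Claim_equal_line_to_sentence : Prop := ∀ (line : String), Dom_line_to_sentence line → Spec_line_to_sentence line (line_to_sentence line)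

-- ===== LEMMAS AND PROOFS =====

-- the suffix after the n-th quote, if cs contains at least n quotes
def pvTailAfter : Nat → List Char → Option (List Char)
  | 0, cs => some cs
  | n + 1, cs =>
    match cs.dropWhile (· ≠ '"') with
    | [] => none
    | _ :: tail => pvTailAfter n tail

lemma pvALoop_spec (rest : List Char) : ∀ (full : List Char) (i cnt : Nat),
    full.drop i = rest → cnt ≤ 5 →
    pvALoop full rest i cnt =
      match pvTailAfter (5 - cnt) rest with
      | some s => if s = [] then full else s
      | none => full := by
  induction rest with
  | nil =>
    intro full i cnt _ hcnt
    rcases Nat.lt_or_ge cnt 5 with h | h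
    · have h5 : 5 - cnt = (5 - cnt - 1) + 1 := by omega
      rw [h5]
      simp [pvALoop, pvTailAfter, List.dropWhile]
    · have : cnt = 5 := by omega
      subst this
      simp [pvALoop, pvTailAfter]
  | cons c t ih =>
    intro full i cnt hdrop hcnt
    rcases Nat.lt_or_ge cnt 5 with h | h
    · have hc5 : (cnt == 5) = false := by simp; omega
      have hdrop' : full.drop (i + 1) = t := by
        simpa [List.tail_drop] using congrArg List.tail hdrop
      by_cases hq : c = '"'
      · subst hq
        have hn : 5 - cnt = (5 - (cnt + 1)) + 1 := by omega
        rw [pvALoop, if_neg (by simp; omega), if_pos (by decide),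
          ih full (i + 1) (cnt + 1) hdrop' (by omega), hn]
        simp [pvTailAfter, List.dropWhile]
      · have hn : 5 - cnt = (5 - cnt - 1) + 1 := by omega
        rw [pvALoop, if_neg (by simp; omega), if_neg (by simp [hq]),
          ih full (i + 1) cnt hdrop' hcnt]
        rw [hn]
        simp [pvTailAfter, List.dropWhile, hq]
    · have : cnt = 5 := by omega
      subst this
      simp [pvALoop, pvTailAfter, hdrop]

lemma pvSplitQ_spec : ∀ (n : Nat) (cs : List Char),
    match pvTailAfter n cs with
    | some s => (pvSplitQ n cs).length = n + 1 ∧ (pvSplitQ n cs).getD n [] = s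
    | none => (pvSplitQ n cs).length ≤ n := by
  intro n
  induction n with
  | zero => intro cs; simp [pvTailAfter, pvSplitQ]
  | succ n ih =>
    intro cs
    rcases h : cs.dropWhile (· ≠ '"') with _ | ⟨q, tail⟩ <;>
      simp only [ne_eq, decide_not] at h
    · simp [pvTailAfter, pvSplitQ, h]
    · have := ih tail
      rcases h' : pvTailAfter n tail with _ | s
      · simp only [h'] at this
        simp [pvTailAfter, pvSplitQ, h, h']
        omega
      · simp only [h'] at this
        have hg : (pvSplitQ n tail)[n]'(by omega) = s := by
          rw [← List.getD_eq_getElem _ [] (by omega), this.2]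
        simp [pvTailAfter, pvSplitQ, h, h', this.1, hg]

-- ===== VERDICT (by name: the statement is the Claim_ definition above) =====
theorem line_to_sentence_spec : Claim_equal_line_to_sentence := by
  intro line _
  unfold Spec_line_to_sentence line_to_sentence line_to_sentence_alt
  have hA := pvALoop_spec line.toList line.toList 0 0 (by simp) (by omega)
  have hB := pvSplitQ_spec 5 line.toList
  rcases h : pvTailAfter 5 line.toList with _ | s
  · simp only [h] at hA hB
    have : (pvSplitQ 5 line.toList).length ≠ 6 := by omega
    simp [hA, this]
  · simp only [h] at hA hB
    have hg : (pvSplitQ 5 line.toList)[5]'(by omega) = s := by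
      rw [← List.getD_eq_getElem _ [] (by omega), hB.2]
    by_cases hs : s = []
    · subst hs
      simp [hA, hB.1, hg]
    · simp [hA, hs, hB.1, hg]
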